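-- pv_equiv track=rewrite | github.com/tazitoo/coolgpus_2026 | src/coolgpus/core.py | determine_segment
-- ===== SOURCE A (Python) =====
-- def determine_segment(t, temps, speeds):
--     """Determine which segment of the piecewise linear fan curve t belongs to."""
--     segments = zip(temps[:-1], temps[1:], speeds[:-1], speeds[1:])
--     for temp_a, temp_b, speed_a, speed_b in segments:
--         if t < temp_a:
--             break
--         if temp_a <= t < temp_b:
--             break
--     return temp_a, temp_b, speed_a, speed_b
-- ===== SOURCE B (Python) =====
-- def determine_segment(t, temps, speeds):
--     """Locate the piecewise-linear segment containing temperature t."""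
--     segments = list(zip(temps[:-1], temps[1:], speeds[:-1], speeds[1:]))
--     j = next((k for k, temp in enumerate(temps) if t < temp), len(temps))
--     i = min(max(j - 1, 0), len(segments) - 1)
--     return segments[i]
-- ===== Notes on version B (the rewrite author's own statement) =====
-- stated objective: alternative
-- what changed: A's break-loop over segment tuples with leftover loop variables is replaced by computing a segment index directly: find the first temperature breakpoint above t, clamp the index just below it into range, and return segments[i]; Pre_ excludes inputs with fewer than 2 temps or speeds, on which A raises UnboundLocalError and B raises IndexError.
import Mathlib
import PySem

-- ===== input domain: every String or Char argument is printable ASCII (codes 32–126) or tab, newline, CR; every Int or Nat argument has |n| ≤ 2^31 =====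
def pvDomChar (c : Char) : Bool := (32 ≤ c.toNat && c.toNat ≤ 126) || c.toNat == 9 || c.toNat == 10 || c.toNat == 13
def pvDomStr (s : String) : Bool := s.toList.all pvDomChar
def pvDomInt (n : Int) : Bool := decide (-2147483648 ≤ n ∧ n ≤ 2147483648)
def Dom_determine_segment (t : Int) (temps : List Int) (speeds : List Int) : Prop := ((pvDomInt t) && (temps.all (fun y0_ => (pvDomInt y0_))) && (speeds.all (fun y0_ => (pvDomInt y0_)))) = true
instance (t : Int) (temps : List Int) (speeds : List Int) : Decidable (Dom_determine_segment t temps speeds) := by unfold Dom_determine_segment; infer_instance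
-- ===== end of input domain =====

-- B replaces A's break-loop over segment tuples by computing a segment index directly
-- (first temperature breakpoint above t, clamped into range); objective: alternative decomposition.
-- Pre_ excludes inputs with fewer than 2 temps or 2 speeds, on which A raises
-- UnboundLocalError (loop body never runs) and B raises IndexError.


-- ===== PORT A =====
-- zip(a, b, c, d): truncates to the shortest, like Python's zip
def pvZip4 : List Int → List Int → List Int → List Int → List (Int × Int × Int × Int)
  | a :: as_, b :: bs, c :: cs, d :: ds => (a, b, c, d) :: pvZip4 as_ bs cs ds
  | _, _, _, _ => []

-- A's for-loop: carries the current loop variables; breaks on either if, else falls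
-- through keeping the last-seen tuple.  `cur` models the loop variables, which are
-- unbound (UnboundLocalError, excluded by Pre_) when the segment list is empty.
def pvLoopA (t : Int) : List (Int × Int × Int × Int) → (Int × Int × Int × Int) → Int × Int × Int × Int
  | [], cur => cur
  | s :: rest, _ =>
    if t < s.1 then s
    else if s.1 ≤ t ∧ t < s.2.1 then s
    else pvLoopA t rest s

def determine_segment (t : Int) (temps : List Int) (speeds : List Int) : Int × Int × Int × Int :=
  let segments := pvZip4 (PySem.List.slice temps none (some (-1))) (PySem.List.slice temps (some 1) none)
                         (PySem.List.slice speeds none (some (-1))) (PySem.List.slice speeds (some 1) none)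
  pvLoopA t segments (0, 0, 0, 0)  -- dummy init: never returned when Pre_ holds

-- ===== PORT B =====
-- next((k for k, temp in enumerate(temps) if t < temp), len(temps)) is List.findIdx,
-- which returns the length when no element matches.
def determine_segment_alt (t : Int) (temps : List Int) (speeds : List Int) : Int × Int × Int × Int :=
  let segments := pvZip4 (PySem.List.slice temps none (some (-1))) (PySem.List.slice temps (some 1) none)
                         (PySem.List.slice speeds none (some (-1))) (PySem.List.slice speeds (some 1) none)
  let j : Int := (temps.findIdx (fun temp => decide (t < temp)) : Int)
  let i : Int := min (max (j - 1) 0) ((segments.length : Int) - 1)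
  (PySem.List.pyGet? segments i).getD (0, 0, 0, 0)  -- none = IndexError on empty segments, excluded by Pre_

-- ===== PRECONDITION & SPEC =====
-- Pre_ excludes the inputs where the segment list is empty (fewer than 2 temps or speeds):
-- there A raises UnboundLocalError and B raises IndexError.
def Pre_determine_segment (t : Int) (temps : List Int) (speeds : List Int) : Prop :=
  2 ≤ temps.length ∧ 2 ≤ speeds.length

instance (t : Int) (temps : List Int) (speeds : List Int) : Decidable (Pre_determine_segment t temps speeds) := by unfold Pre_determine_segment; infer_instance

def pvWitness_determine_segment : Int × List Int × List Int := (35, [30, 50, 70], [20, 60, 100])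

def Spec_determine_segment (t : Int) (temps : List Int) (speeds : List Int) (out : Int × Int × Int × Int) : Prop := out = determine_segment_alt t temps speeds
instance (t : Int) (temps : List Int) (speeds : List Int) (out : Int × Int × Int × Int) : Decidable (Spec_determine_segment t temps speeds out) := by unfold Spec_determine_segment; infer_instance

-- ===== CLAIM (what is proved, stated in full; the proofs are below) =====
def Claim_equal_determine_segment : Prop := ∀ (t : Int) (temps : List Int) (speeds : List Int), Dom_determine_segment t temps speeds → Pre_determine_segment t temps speeds → Spec_determine_segment t temps speeds (determine_segment t temps speeds)

-- ===== LEMMAS AND PROOFS =====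

-- proof-side view of the segment list, with a self-similar recursion
def pvSegs : List Int → List Int → List (Int × Int × Int × Int)
  | a :: b :: r, c :: d :: s => (a, b, c, d) :: pvSegs (b :: r) (d :: s)
  | _, _ => []

theorem pvSegs_eq (temps speeds : List Int) :
    pvZip4 temps.dropLast temps.tail speeds.dropLast speeds.tail = pvSegs temps speeds := by
  induction temps generalizing speeds with
  | nil => cases speeds <;> simp [pvZip4, pvSegs]
  | cons a ts ih =>
    cases ts with
    | nil =>
      cases speeds with
      | nil => simp [pvZip4, pvSegs]
      | cons c ss => cases ss <;> simp [pvZip4, pvSegs]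
    | cons b r =>
      cases speeds with
      | nil => simp [pvZip4, pvSegs]
      | cons c ss =>
        cases ss with
        | nil => simp [pvZip4, pvSegs]
        | cons d s =>
          show pvZip4 (a :: (b :: r).dropLast) (b :: r) (c :: (d :: s).dropLast) (d :: s)
              = (a, b, c, d) :: pvSegs (b :: r) (d :: s)
          rw [pvZip4]
          exact congrArg _ (by simpa using ih (d :: s))

-- main lemma: A's break-loop on the nonempty segment list equals B's clamped index
theorem pvLoop_eq_idx (t : Int) :
    ∀ (r : List Int) (a b : Int) (s : List Int) (c d : Int) (dflt : Int × Int × Int × Int),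
      pvLoopA t (pvSegs (a :: b :: r) (c :: d :: s)) dflt =
        (pvSegs (a :: b :: r) (c :: d :: s)).getD
          (min ((a :: b :: r).findIdx (fun x => decide (t < x)) - 1)
               ((pvSegs (a :: b :: r) (c :: d :: s)).length - 1)) (0, 0, 0, 0) := by
  intro r
  induction r with
  | nil =>
    intro a b s c d dflt
    show pvLoopA t [(a, b, c, d)] dflt = _
    simp only [pvSegs, List.length, List.findIdx]
    rw [pvLoopA]
    split_ifs <;> simp [pvLoopA, List.getD]
  | cons e r' ih =>
    intro a b s c d dflt
    cases s with
    | nil =>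
      show pvLoopA t [(a, b, c, d)] dflt = _
      simp only [pvSegs, List.length]
      rw [pvLoopA]
      split_ifs <;> simp [pvLoopA, List.getD]
    | cons f s' =>
      have hSegs : pvSegs (a :: b :: e :: r') (c :: d :: f :: s')
          = (a, b, c, d) :: pvSegs (b :: e :: r') (d :: f :: s') := rfl
      have hlen : 1 ≤ (pvSegs (b :: e :: r') (d :: f :: s')).length := by
        simp [pvSegs]
      rw [hSegs, pvLoopA]
      by_cases h1 : t < a
      · have hj : (a :: b :: e :: r').findIdx (fun x => decide (t < x)) = 0 := by
          simp [List.findIdx_cons, h1]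
        simp [h1, hj, List.getD]
      · by_cases h2 : t < b
        · have hj : (a :: b :: e :: r').findIdx (fun x => decide (t < x)) = 1 := by
            simp [List.findIdx_cons, h1, h2]
          have hle : a ≤ t := by omega
          simp [h1, h2, hle, hj, List.getD]
        · -- t ≥ a and t ≥ b: recurse
          have hle : a ≤ t := by omega
          have hjtail : 1 ≤ (b :: e :: r').findIdx (fun x => decide (t < x)) := by
            simp [List.findIdx_cons, h2]
          have hj : (a :: b :: e :: r').findIdx (fun x => decide (t < x))
              = (b :: e :: r').findIdx (fun x => decide (t < x)) + 1 := by
            simp [List.findIdx_cons, h1]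
          rw [if_neg h1, if_neg (show ¬ (a ≤ t ∧ t < b) from fun h => h2 h.2)]
          rw [ih b e s' d f (a, b, c, d), hj]
          have hidx : min ((b :: e :: r').findIdx (fun x => decide (t < x)) + 1 - 1)
                (((a, b, c, d) :: pvSegs (b :: e :: r') (d :: f :: s')).length - 1)
              = min ((b :: e :: r').findIdx (fun x => decide (t < x)) - 1)
                ((pvSegs (b :: e :: r') (d :: f :: s')).length - 1) + 1 := by
            simp only [List.length_cons]
            omega
          rw [hidx, List.getD_cons_succ]

-- ===== VERDICT (by name: the statement is the Claim_ definition above) =====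
theorem determine_segment_spec : Claim_equal_determine_segment := by
  intro t temps speeds _ hpre
  obtain ⟨h1, h2⟩ := hpre
  unfold Spec_determine_segment determine_segment determine_segment_alt
  simp only [PySem.List.slice_to_neg_one, PySem.List.slice_from_one, pvSegs_eq]
  obtain ⟨a, b, r, rfl⟩ : ∃ a b r, temps = a :: b :: r := by
    match temps, h1 with
    | a :: b :: r, _ => exact ⟨a, b, r, rfl⟩
  obtain ⟨c, d, s, rfl⟩ : ∃ c d s, speeds = c :: d :: s := by
    match speeds, h2 with
    | c :: d :: s, _ => exact ⟨c, d, s, rfl⟩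
  rw [pvLoop_eq_idx]
  -- turn B's Int index arithmetic into the Nat index of the lemma
  set segs := pvSegs (a :: b :: r) (c :: d :: s) with hsegs
  have hm : 1 ≤ segs.length := by simp [hsegs, pvSegs]
  set jn := (a :: b :: r).findIdx (fun x => decide (t < x)) with hjn
  have hi : min (max ((jn : Int) - 1) 0) ((segs.length : Int) - 1)
      = ((min (jn - 1) (segs.length - 1) : Nat) : Int) := by
    push_cast
    omega
  rw [hi, PySem.List.pyGet?_natCast]
  have hlt : min (jn - 1) (segs.length - 1) < segs.length := by omega
  rw [List.getElem?_eq_getElem hlt]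
  simp [List.getD, List.getElem?_eq_getElem hlt]
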